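-- pv_equiv track=rewrite | github.com/ekatnic/FantasyChallenge | fantasy_football_app/utils.py | rank_entries
-- ===== SOURCE A (Python) =====
-- def rank_entries(entries_dict):
--     """
--     Rank entries in a dictionary of entries and their total scores.
--
--     Args:
--         entries_dict (dict): A dictionary where the keys are entries and the values are dicts of their total scores.
--     """
--     sorted_entries = sorted(entries_dict.items(), key=lambda x: x[1]['total'], reverse=True)
--
--     user_entries = {}
--     last_score = None
--     for i, (entry, scoring_dict) in enumerate(sorted_entries, start=1):
--         if scoring_dict['total'] != last_score:
--             rank = i
--         user_entries[entry] = {**scoring_dict, 'rank': rank}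
--         last_score = scoring_dict['total']
--     return user_entries
-- ===== SOURCE B (Python) =====
-- def rank_entries(entries_dict):
--     """
--     Rank entries in a dictionary of entries and their total scores.
--
--     Competition ("1224") rank of an entry = 1 + number of entries with a
--     strictly greater total; no running last_score/rank state is needed.
--     """
--     totals = [sd['total'] for sd in entries_dict.values()]
--     return {
--         entry: {**sd, 'rank': 1 + sum(t > sd['total'] for t in totals)}
--         for entry, sd in sorted(entries_dict.items(), key=lambda x: x[1]['total'], reverse=True)
--     }
-- ===== Notes on version B (the rewrite author's own statement) =====
-- stated objective: alternative
-- what changed: Replaces A's stateful enumerate/last_score rank-carrying pass with a stateless per-entry competition rank computed as 1 + count of strictly greater totals.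
-- outside the precondition, e.g. on rank_entries({'a': {'x': 1}}): A raises KeyError, B raises KeyError
import Mathlib
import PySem

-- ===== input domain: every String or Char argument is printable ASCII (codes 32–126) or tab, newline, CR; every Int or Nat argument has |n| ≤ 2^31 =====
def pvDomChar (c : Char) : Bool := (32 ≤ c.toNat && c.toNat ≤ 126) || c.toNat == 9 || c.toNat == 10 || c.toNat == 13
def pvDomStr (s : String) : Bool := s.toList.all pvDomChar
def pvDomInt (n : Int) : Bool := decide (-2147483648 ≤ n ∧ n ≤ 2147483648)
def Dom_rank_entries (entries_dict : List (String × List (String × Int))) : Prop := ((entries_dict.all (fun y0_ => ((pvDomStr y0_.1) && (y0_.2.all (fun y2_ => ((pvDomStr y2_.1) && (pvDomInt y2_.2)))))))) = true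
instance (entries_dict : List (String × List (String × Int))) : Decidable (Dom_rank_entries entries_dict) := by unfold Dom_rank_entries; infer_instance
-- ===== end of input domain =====

-- B replaces A's stateful enumerate/last_score rank carry with a stateless
-- per-entry '1 + count of strictly greater totals' (competition ranking); objective: alternative.

-- shared helpers (the same Python expressions occur verbatim in A and B):
-- sd['total']
def getTotal (sd : List (String × Int)) : Int := (PySem.Dict.mk sd).getD "total" 0
-- {**sd, 'rank': r}
def withRank (sd : List (String × Int)) (r : Int) : List (String × Int) :=
  ((sd.foldl (fun d p => PySem.Dict.insert d p.1 p.2) PySem.Dict.empty).insert "rank" r).items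

-- ===== PORT A =====
-- the 'for i, (entry, scoring_dict) in enumerate(sorted_entries, start=1)' loop with its
-- last_score / rank state (rank starts unassigned; 0 is never read on the first iteration)
def rankA_loop : List (String × List (String × Int)) → Int → Option Int → Int →
    List (String × List (String × Int))
  | [], _, _, _ => []
  | (e, sd) :: rest, i, last, rank =>
      let r := if some (getTotal sd) ≠ last then i else rank
      (e, withRank sd r) :: rankA_loop rest (i + 1) (some (getTotal sd)) r

def rank_entries (entries_dict : List (String × List (String × Int))) : List (String × List (String × Int)) :=
  rankA_loop (PySem.List.sorted entries_dict (fun x => getTotal x.2) true) 1 none 0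

-- ===== PORT B =====
def rank_entries_alt (entries_dict : List (String × List (String × Int))) : List (String × List (String × Int)) :=
  let totals := entries_dict.map (fun p => getTotal p.2)
  (PySem.List.sorted entries_dict (fun x => getTotal x.2) true).map
    (fun p => (p.1, withRank p.2
      (1 + totals.foldl (fun a t => a + (if getTotal p.2 < t then 1 else 0)) 0)))

-- ===== PRECONDITION & SPEC =====
-- Pre_ excludes scoring dicts without a 'total' key (A raises KeyError there) and association
-- lists with duplicate outer or inner keys, which do not represent any Python dict (the ports'
-- first-match lookup there is a convention artefact, not behaviour of A).
def Pre_rank_entries (entries_dict : List (String × List (String × Int))) : Prop :=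
  (entries_dict.map (·.1)).Nodup ∧
  ∀ p ∈ entries_dict, "total" ∈ p.2.map (·.1) ∧ (p.2.map (·.1)).Nodup
instance (entries_dict : List (String × List (String × Int))) : Decidable (Pre_rank_entries entries_dict) := by unfold Pre_rank_entries; infer_instance

def pvWitness_rank_entries : (List (String × List (String × Int))) :=
  [("a", [("total", 3), ("wk1", 2)]), ("b", [("total", 1)]), ("c", [("total", 3)])]

def Spec_rank_entries (entries_dict : List (String × List (String × Int))) (out : List (String × List (String × Int))) : Prop := out = rank_entries_alt entries_dict
instance (entries_dict : List (String × List (String × Int))) (out : List (String × List (String × Int))) : Decidable (Spec_rank_entries entries_dict out) := by unfold Spec_rank_entries; infer_instance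

-- ===== CLAIM (what is proved, stated in full; the proofs are below) =====
def Claim_equal_rank_entries : Prop := ∀ (entries_dict : List (String × List (String × Int))), Dom_rank_entries entries_dict → Pre_rank_entries entries_dict → Spec_rank_entries entries_dict (rank_entries entries_dict)

-- ===== LEMMAS AND PROOFS =====

-- number of entries of f whose total is strictly greater than t
def cntGt (f : List (String × List (String × Int))) (t : Int) : Nat :=
  f.countP (fun p => decide (t < getTotal p.2))

lemma cntGt_append (u v : List (String × List (String × Int))) (t : Int) :
    cntGt (u ++ v) t = cntGt u t + cntGt v t := by
  simp [cntGt, List.countP_append]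

lemma sum_ite_gt (x : Int) (l : List Int) :
    (l.map (fun t => if x < t then (1 : Int) else 0)).sum = (l.countP (fun t => decide (x < t)) : Int) := by
  induction l with
  | nil => simp
  | cons a t ih =>
    simp only [List.map_cons, List.sum_cons, List.countP_cons, ih]
    split_ifs with h <;> simp_all <;> omega

-- A's loop over a suffix s of the (total-nonincreasing) full list f = c ++ s computes the
-- stateless competition rank for every element.
lemma rankA_loop_eq (f : List (String × List (String × Int)))
    (hf : f.Pairwise (fun a b => getTotal b.2 ≤ getTotal a.2)) :
    ∀ (s c : List (String × List (String × Int))), c ++ s = f →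
      rankA_loop s ((c.length : Int) + 1) ((c.getLast?).map (fun p => getTotal p.2))
          (match c.getLast? with
            | none => 0
            | some y => 1 + (cntGt f (getTotal y.2) : Int)) =
        s.map (fun p => (p.1, withRank p.2 (1 + (cntGt f (getTotal p.2) : Int)))) := by
  intro s
  induction s with
  | nil => intro c _; simp [rankA_loop]
  | cons hd tl ih =>
    intro c hcs
    obtain ⟨e, sd⟩ := hd
    have hr : (if some (getTotal sd) ≠ (c.getLast?).map (fun p => getTotal p.2)
          then (c.length : Int) + 1
          else (match c.getLast? with
            | none => 0
            | some y => 1 + (cntGt f (getTotal y.2) : Int))) =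
        1 + (cntGt f (getTotal sd) : Int) := by
      rcases hl : c.getLast? with _ | y
      · -- c = [], f = (e, sd) :: tl, nobody is strictly greater
        have hc : c = [] := List.getLast?_eq_none_iff.mp hl
        subst hc
        simp only [List.nil_append] at hcs
        subst hcs
        have h0 : cntGt ((e, sd) :: tl) (getTotal sd) = 0 := by
          rw [cntGt, List.countP_eq_zero]
          rintro p hp
          rcases List.mem_cons.mp hp with h | h
          · subst h; simp
          · have := (List.pairwise_cons.mp hf).1 p h
            simpa using not_lt.mpr this
        simp [h0]
      · -- c = c₀ ++ [y]
        obtain ⟨c₀, hc⟩ : ∃ c₀, c = c₀ ++ [y] := by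
          rcases List.eq_nil_or_concat c with h | ⟨c₀, z, h⟩
          · subst h; simp at hl
          · rw [List.concat_eq_append] at h
            subst h
            rw [List.getLast?_concat] at hl
            exact ⟨c₀, by simp_all⟩
        subst hc
        rw [← hcs, List.append_assoc, List.pairwise_append] at hf
        obtain ⟨hc₀, hys, hcross⟩ := hf
        simp only [List.singleton_append] at hys
        rw [List.pairwise_cons] at hys
        simp only [Option.map_some]
        by_cases ht : getTotal sd = getTotal y.2
        · simp [ht]
        · -- totals changed: strictly smaller now; rank = position
          have hyin : getTotal sd ≤ getTotal y.2 := hys.1 (e, sd) (by simp)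
          have hlt : getTotal sd < getTotal y.2 := lt_of_le_of_ne hyin ht
          rw [if_pos (by simpa using ht)]
          rw [← hcs, List.append_assoc, cntGt_append]
          have h1 : cntGt c₀ (getTotal sd) = c₀.length := by
            rw [cntGt, List.countP_eq_length]
            intro p hp
            have hpy : getTotal y.2 ≤ getTotal p.2 := hcross p hp y (by simp)
            exact decide_eq_true (lt_of_lt_of_le hlt hpy)
          have h2 : cntGt ([y] ++ (e, sd) :: tl) (getTotal sd) = 1 := by
            have hz : cntGt ((e, sd) :: tl) (getTotal sd) = 0 := by
              rw [cntGt, List.countP_eq_zero]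
              rintro p hp
              rcases List.mem_cons.mp hp with h | h
              · subst h; simp
              · have := (List.pairwise_cons.mp hys.2).1 p h
                simpa using not_lt.mpr this
            rw [cntGt_append, hz]
            simp [cntGt, hlt]
          rw [h1, h2]
          simp only [List.length_append, List.length_singleton]
          push_cast
          ring
    have ihc := ih (c ++ [(e, sd)]) (by simpa using hcs)
    simp only [List.getLast?_concat, List.length_append, List.length_singleton,
      Option.map_some] at ihc
    push_cast at ihc
    simp only [rankA_loop, List.map_cons]
    rw [hr, ihc]

-- ===== VERDICT (by name: the statement is the Claim_ definition above) =====
theorem rank_entries_spec : Claim_equal_rank_entries := by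
  intro l _ _
  unfold Spec_rank_entries rank_entries rank_entries_alt
  set S := PySem.List.sorted l (fun x => getTotal x.2) true with hS
  have hperm : S.Perm l := PySem.List.sorted_perm l _ true
  have hpw : S.Pairwise (fun a b => getTotal b.2 ≤ getTotal a.2) :=
    PySem.List.sorted_pairwise_rev l _
  have hmain := rankA_loop_eq S hpw S [] rfl
  simp only [List.length_nil, Int.natCast_zero, zero_add, List.getLast?_nil,
    Option.map_none] at hmain
  rw [hmain]
  apply List.map_congr_left
  intro p _
  refine congrArg₂ _ rfl (congrArg _ ?_)
  rw [PySem.List.foldl_add, zero_add, sum_ite_gt, List.countP_map, cntGt]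
  simp only [Function.comp_def]
  exact congrArg Nat.cast (congrArg (1 + ·) (hperm.countP_eq _))
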